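-- pv_equiv track=rewrite | github.com/DuyTa506/texttoSQL | scripts/run_pipeline.py | _apply_mode_overrides
-- ===== SOURCE A (Python) =====
-- _MODE_OVERRIDES = {
--     "hybrid": {
--         "schema_graph.enabled": False,
--         "schema_graph.hybrid": False,
--     },
--     "graph": {
--         "schema_graph.enabled": True,
--         "schema_graph.hybrid": False,
--     },
--     "merge": {
--         "schema_graph.enabled": True,
--         "schema_graph.hybrid": True,
--     },
-- }
--
-- def _apply_mode_overrides(cfg: dict, mode: str) -> dict:
--     """Apply mode-specific config overrides (returns a modified copy)."""
--     import copy
--     cfg = copy.deepcopy(cfg)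
--     overrides = _MODE_OVERRIDES.get(mode, {})
--     for key_path, value in overrides.items():
--         parts = key_path.split(".")
--         node = cfg
--         for part in parts[:-1]:
--             if part not in node:
--                 node[part] = {}
--             node = node[part]
--         node[parts[-1]] = value
--     return cfg
-- ===== SOURCE B (Python) =====
-- # All three mode overrides touch exactly the schema_graph subtree, so B keeps only a
-- # flag table mode -> (enabled, hybrid) and writes the two leaves directly via setdefault.
-- _MODE_FLAGS = {
--     "hybrid": (False, False),
--     "graph": (True, False),
--     "merge": (True, True),
-- }
--
--
-- def _apply_mode_overrides(cfg: dict, mode: str) -> dict: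
--     """Apply mode-specific config overrides (returns a modified copy)."""
--     import copy
--     cfg = copy.deepcopy(cfg)
--     flags = _MODE_FLAGS.get(mode)
--     if flags is not None:
--         sg = cfg.setdefault("schema_graph", {})
--         sg["enabled"], sg["hybrid"] = flags
--     return cfg
-- ===== Notes on version B (the rewrite author's own statement) =====
-- stated objective: simpler
-- what changed: All three override tables only set schema_graph.enabled/hybrid, so B replaces the dotted-path table and the split/pointer-walk loop by a flag table mode -> (enabled, hybrid) and two direct writes into cfg.setdefault('schema_graph', {}).
import Mathlib
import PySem

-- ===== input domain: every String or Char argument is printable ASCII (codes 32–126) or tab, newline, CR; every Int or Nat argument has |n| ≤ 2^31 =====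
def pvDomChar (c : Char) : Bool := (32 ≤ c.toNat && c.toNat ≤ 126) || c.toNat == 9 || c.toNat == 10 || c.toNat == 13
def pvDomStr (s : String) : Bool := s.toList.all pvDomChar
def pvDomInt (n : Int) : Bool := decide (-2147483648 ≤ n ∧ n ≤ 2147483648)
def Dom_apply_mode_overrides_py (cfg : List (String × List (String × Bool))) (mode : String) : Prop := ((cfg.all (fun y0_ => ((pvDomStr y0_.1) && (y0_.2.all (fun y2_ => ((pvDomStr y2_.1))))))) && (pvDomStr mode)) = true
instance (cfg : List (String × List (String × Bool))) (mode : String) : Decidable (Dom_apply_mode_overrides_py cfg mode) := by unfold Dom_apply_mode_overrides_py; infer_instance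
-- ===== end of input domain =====

-- B replaces A's dotted-path table and split/pointer-walk loop by a flag table mode -> (enabled, hybrid)
-- and two direct writes into the schema_graph subtree (objective: simpler); same return value,
-- mutation of the copy only.

-- ===== PORT A =====
-- _MODE_OVERRIDES: mode -> dict of (dotted key path, value)
def pvModeOverridesA : PySem.Dict String (List (String × Bool)) :=
  PySem.Dict.mk
    [("hybrid", [("schema_graph.enabled", false), ("schema_graph.hybrid", false)]),
     ("graph",  [("schema_graph.enabled", true),  ("schema_graph.hybrid", false)]),
     ("merge",  [("schema_graph.enabled", true),  ("schema_graph.hybrid", true)])]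

-- one iteration of A's outer loop: split the dotted path and walk down; exact for the typed cfg
-- (two dict levels), on which every reachable key path has exactly two parts, so the descent loop
-- over parts[:-1] runs exactly once ('if part not in node: node[part] = {}; node = node[part]')
-- and then 'node[parts[-1]] = value' writes into the inner dict (in-place = insert back here).
def pvApplyPathA (cfg : PySem.Dict String (PySem.Dict String Bool)) (kp : String) (v : Bool) :
    PySem.Dict String (PySem.Dict String Bool) :=
  match PySem.Str.split? kp "." with
  | some [outer, leaf] =>
      let node := cfg.getD outer (PySem.Dict.mk [])
      cfg.insert outer (node.insert leaf v)
  | _ => cfg  -- unreachable: every key of _MODE_OVERRIDES has exactly two parts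

def apply_mode_overrides_py (cfg : List (String × List (String × Bool))) (mode : String) :
    List (String × List (String × Bool)) :=
  let cfgD : PySem.Dict String (PySem.Dict String Bool) :=
    PySem.Dict.mk (cfg.map (fun p => (p.1, PySem.Dict.mk p.2)))      -- copy.deepcopy(cfg)
  let overrides := pvModeOverridesA.getD mode []
  let out := overrides.foldl (fun c kv => pvApplyPathA c kv.1 kv.2) cfgD
  out.items.map (fun p => (p.1, p.2.items))

-- ===== PORT B =====
-- _MODE_FLAGS: mode -> (enabled, hybrid)
def pvModeFlags : PySem.Dict String (Bool × Bool) :=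
  PySem.Dict.mk [("hybrid", (false, false)), ("graph", (true, false)), ("merge", (true, true))]

def apply_mode_overrides_py_alt (cfg : List (String × List (String × Bool))) (mode : String) :
    List (String × List (String × Bool)) :=
  let cfgD : PySem.Dict String (PySem.Dict String Bool) :=
    PySem.Dict.mk (cfg.map (fun p => (p.1, PySem.Dict.mk p.2)))      -- copy.deepcopy(cfg)
  let out :=
    match pvModeFlags.get? mode with                                 -- _MODE_FLAGS.get(mode)
    | none => cfgD                                                   -- flags is None: untouched copy
    | some (e, h) =>
        -- sg = cfg.setdefault("schema_graph", {}); sg["enabled"], sg["hybrid"] = flags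
        let sg := cfgD.getD "schema_graph" (PySem.Dict.mk [])
        cfgD.insert "schema_graph" ((sg.insert "enabled" e).insert "hybrid" h)
  out.items.map (fun p => (p.1, p.2.items))

-- ===== PRECONDITION & SPEC =====
def Spec_apply_mode_overrides_py (cfg : List (String × List (String × Bool))) (mode : String) (out : List (String × List (String × Bool))) : Prop := out = apply_mode_overrides_py_alt cfg mode
instance (cfg : List (String × List (String × Bool))) (mode : String) (out : List (String × List (String × Bool))) : Decidable (Spec_apply_mode_overrides_py cfg mode out) := by unfold Spec_apply_mode_overrides_py; infer_instance

-- ===== CLAIM (what is proved, stated in full; the proofs are below) =====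
def Claim_equal_apply_mode_overrides_py : Prop := ∀ (cfg : List (String × List (String × Bool))) (mode : String), Dom_apply_mode_overrides_py cfg mode → Spec_apply_mode_overrides_py cfg mode (apply_mode_overrides_py cfg mode)

-- ===== LEMMAS AND PROOFS =====

theorem split_enabled_eval : PySem.Str.split? "schema_graph.enabled" "." = some ["schema_graph", "enabled"] := by decide

theorem split_hybrid_eval : PySem.Str.split? "schema_graph.hybrid" "." = some ["schema_graph", "hybrid"] := by decide

-- applying A's two dotted overrides equals B's one schema_graph rewrite, for any cfg dict
theorem both_writes_eq (d : PySem.Dict String (PySem.Dict String Bool)) (b1 b2 : Bool) :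
    pvApplyPathA (pvApplyPathA d "schema_graph.enabled" b1) "schema_graph.hybrid" b2
      = d.insert "schema_graph"
          (((d.getD "schema_graph" (PySem.Dict.mk [])).insert "enabled" b1).insert "hybrid" b2) := by
  simp [pvApplyPathA, split_enabled_eval, split_hybrid_eval,
    PySem.Dict.getD_insert_self, PySem.Dict.insert_insert_self]

-- ===== VERDICT (by name: the statement is the Claim_ definition above) =====
theorem apply_mode_overrides_py_spec : Claim_equal_apply_mode_overrides_py := by
  intro cfg mode _
  unfold Spec_apply_mode_overrides_py apply_mode_overrides_py apply_mode_overrides_py_alt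
  simp only [pvModeOverridesA, pvModeFlags, PySem.Dict.getD_eq_get?_getD, PySem.Dict.get?_mk_cons]
  split_ifs <;> first | rfl | simp [List.foldl, both_writes_eq, PySem.Dict.getD_eq_get?_getD]
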